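-- pv_equiv track=rewrite | github.com/Merikanto/pull-aps-feed | aps_feed/processors.py | _select_enhanced_keywords
-- ===== SOURCE A (Python) =====
-- from typing import Any, Dict, List, Optional
--
-- def _select_enhanced_keywords(title_words: List[str], max_words: int) -> List[str]:
--     """
--     Select enhanced keywords using better prioritization strategies.
--
--     Prioritizes words that are more likely to be distinctive for scientific articles.
--
--     Args:
--         title_words: List of extracted title words
--         max_words: Maximum number of keywords to select
--
--     Returns:
--         List of selected keywords for search
--     """
--     if len(title_words) <= max_words:
--         return title_words
--
--     # Define word categories with different priorities
--     high_priority_words = []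
--     medium_priority_words = []
--     low_priority_words = []
--
--     # Scientific terms that are often distinctive
--     scientific_indicators = {
--         'quantum', 'magnetic', 'electronic', 'optical', 'thermal', 'mechanical',
--         'superconducting', 'ferromagnetic', 'antiferromagnetic', 'topological',
--         'phase', 'transition', 'crystal', 'molecular', 'atomic', 'nuclear',
--         'photonic', 'plasmonic', 'metamaterial', 'nanoscale', 'microscale'
--     }
--
--     # Physics-specific terms
--     physics_terms = {
--         'field', 'wave', 'particle', 'energy', 'momentum', 'spin', 'charge',
--         'current', 'voltage', 'resistance', 'conductivity', 'temperature',
--         'pressure', 'density', 'frequency', 'wavelength', 'amplitude'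
--     }
--
--     for word in title_words:
--         word_lower = word.lower()
--
--         # High priority: distinctive scientific terms
--         if word_lower in scientific_indicators:
--             high_priority_words.append(word)
--         # Medium priority: physics terms and longer words
--         elif word_lower in physics_terms or len(word) >= 7:
--             medium_priority_words.append(word)
--         # Low priority: common words
--         else:
--             low_priority_words.append(word)
--
--     # Select keywords in priority order
--     selected_keywords = []
--
--     # Add high priority words first
--     for word in high_priority_words[:max_words]:
--         selected_keywords.append(word)
--
--     # Fill remaining slots with medium priority words
--     remaining_slots = max_words - len(selected_keywords)
--     for word in medium_priority_words[:remaining_slots]: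
--         selected_keywords.append(word)
--
--     # Fill any remaining slots with low priority words
--     remaining_slots = max_words - len(selected_keywords)
--     for word in low_priority_words[:remaining_slots]:
--         selected_keywords.append(word)
--
--     # If we still don't have enough words, use original order
--     if len(selected_keywords) < max_words:
--         for word in title_words:
--             if word not in selected_keywords:
--                 selected_keywords.append(word)
--                 if len(selected_keywords) >= max_words:
--                     break
--
--     return selected_keywords[:max_words]
-- ===== SOURCE B (Python) =====
-- _SCIENTIFIC = frozenset({
--     'quantum', 'magnetic', 'electronic', 'optical', 'thermal', 'mechanical',
--     'superconducting', 'ferromagnetic', 'antiferromagnetic', 'topological',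
--     'phase', 'transition', 'crystal', 'molecular', 'atomic', 'nuclear',
--     'photonic', 'plasmonic', 'metamaterial', 'nanoscale', 'microscale'
-- })
--
-- _PHYSICS = frozenset({
--     'field', 'wave', 'particle', 'energy', 'momentum', 'spin', 'charge',
--     'current', 'voltage', 'resistance', 'conductivity', 'temperature',
--     'pressure', 'density', 'frequency', 'wavelength', 'amplitude'
-- })
--
--
-- def _priority(word):
--     word_lower = word.lower()
--     if word_lower in _SCIENTIFIC:
--         return 0
--     if word_lower in _PHYSICS or len(word) >= 7:
--         return 1
--     return 2
--
--
-- def _select_enhanced_keywords(title_words, max_words):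
--     if len(title_words) <= max_words:
--         return title_words
--     return sorted(title_words, key=_priority)[:max_words]
-- ===== Notes on version B (the rewrite author's own statement) =====
-- stated objective: simpler
-- what changed: Replaces the three explicit priority buckets, the three slice-and-append fill loops and the dead 'not enough words' fallback loop with a single stable sort by a 0/1/2 priority key followed by one slice.
-- outside the precondition, e.g. on _select_enhanced_keywords(['', 'a'], -1): A returns [], B returns ['']
import Mathlib
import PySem

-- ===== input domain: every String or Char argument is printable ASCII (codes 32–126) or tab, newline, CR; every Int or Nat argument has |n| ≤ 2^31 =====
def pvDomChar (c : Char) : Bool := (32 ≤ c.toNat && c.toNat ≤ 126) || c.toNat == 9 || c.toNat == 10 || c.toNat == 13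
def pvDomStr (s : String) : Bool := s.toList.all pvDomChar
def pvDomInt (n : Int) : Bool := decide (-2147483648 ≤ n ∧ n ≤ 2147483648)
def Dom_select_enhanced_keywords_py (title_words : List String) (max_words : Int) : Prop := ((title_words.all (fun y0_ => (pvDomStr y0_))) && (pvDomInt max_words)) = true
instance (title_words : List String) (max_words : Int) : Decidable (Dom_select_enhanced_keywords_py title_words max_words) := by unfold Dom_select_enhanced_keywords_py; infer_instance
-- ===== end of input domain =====

-- B replaces A's three priority buckets, slice-fills and dead fallback loop with one
-- stable sort by a 0/1/2 priority key plus a slice (objective: simpler).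

-- ===== PORT A =====
def pvScientificIndicators : PySem.Set String := PySem.Set.ofList
  ["quantum", "magnetic", "electronic", "optical", "thermal", "mechanical",
   "superconducting", "ferromagnetic", "antiferromagnetic", "topological",
   "phase", "transition", "crystal", "molecular", "atomic", "nuclear",
   "photonic", "plasmonic", "metamaterial", "nanoscale", "microscale"]

def pvPhysicsTerms : PySem.Set String := PySem.Set.ofList
  ["field", "wave", "particle", "energy", "momentum", "spin", "charge",
   "current", "voltage", "resistance", "conductivity", "temperature",
   "pressure", "density", "frequency", "wavelength", "amplitude"]

-- the final 'if we still don't have enough words' loop of A, ported step for step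
def pvFillA (title_words : List String) (selected : List String) (max_words : Int) : List String :=
  match title_words with
  | [] => selected
  | w :: rest =>
    if w ∈ selected then pvFillA rest selected max_words
    else
      let selected' := selected ++ [w]
      if max_words ≤ (selected'.length : Int) then selected'
      else pvFillA rest selected' max_words

def select_enhanced_keywords_py (title_words : List String) (max_words : Int) : List String :=
  if (title_words.length : Int) ≤ max_words then title_words
  else
    let hml := title_words.foldl
      (fun (acc : List String × List String × List String) word =>
        let word_lower := PySem.Str.lower word
        if PySem.Set.contains pvScientificIndicators word_lower then
          (acc.1 ++ [word], acc.2.1, acc.2.2)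
        else if PySem.Set.contains pvPhysicsTerms word_lower || decide ((7 : Int) ≤ PySem.Str.len word) then
          (acc.1, acc.2.1 ++ [word], acc.2.2)
        else
          (acc.1, acc.2.1, acc.2.2 ++ [word]))
      ([], [], [])
    let sel1 := PySem.List.slice hml.1 none (some max_words)
    let sel2 := sel1 ++ PySem.List.slice hml.2.1 none (some (max_words - (sel1.length : Int)))
    let sel3 := sel2 ++ PySem.List.slice hml.2.2 none (some (max_words - (sel2.length : Int)))
    let sel4 := if (sel3.length : Int) < max_words then pvFillA title_words sel3 max_words else sel3
    PySem.List.slice sel4 none (some max_words)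

-- ===== PORT B =====
def pvPriority (word : String) : Int :=
  let word_lower := PySem.Str.lower word
  if PySem.Set.contains pvScientificIndicators word_lower then 0
  else if PySem.Set.contains pvPhysicsTerms word_lower || decide ((7 : Int) ≤ PySem.Str.len word) then 1
  else 2

def select_enhanced_keywords_py_alt (title_words : List String) (max_words : Int) : List String :=
  if (title_words.length : Int) ≤ max_words then title_words
  else PySem.List.slice (PySem.List.sorted title_words pvPriority false) none (some max_words)

-- ===== PRECONDITION & SPEC =====
-- Pre_ excludes negative max_words, a count outside the function's natural domain, where
-- Python's negative-slice arithmetic makes both implementations' results accidental.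
def Pre_select_enhanced_keywords_py (title_words : List String) (max_words : Int) : Prop :=
  0 ≤ max_words
instance (title_words : List String) (max_words : Int) : Decidable (Pre_select_enhanced_keywords_py title_words max_words) := by unfold Pre_select_enhanced_keywords_py; infer_instance

def pvWitness_select_enhanced_keywords_py : List String × Int := (["quantum", "the", "field"], 2)

def Spec_select_enhanced_keywords_py (title_words : List String) (max_words : Int) (out : List String) : Prop := out = select_enhanced_keywords_py_alt title_words max_words
instance (title_words : List String) (max_words : Int) (out : List String) : Decidable (Spec_select_enhanced_keywords_py title_words max_words out) := by unfold Spec_select_enhanced_keywords_py; infer_instance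

-- ===== CLAIM (what is proved, stated in full; the proofs are below) =====
def Claim_equal_select_enhanced_keywords_py : Prop := ∀ (title_words : List String) (max_words : Int), Dom_select_enhanced_keywords_py title_words max_words → Pre_select_enhanced_keywords_py title_words max_words → Spec_select_enhanced_keywords_py title_words max_words (select_enhanced_keywords_py title_words max_words)

-- ===== LEMMAS AND PROOFS =====

def pvF (i : Int) (xs : List String) : List String := xs.filter (fun w => pvPriority w == i)

theorem pvPriority_cases (w : String) : pvPriority w = 0 ∨ pvPriority w = 1 ∨ pvPriority w = 2 := by
  dsimp only [pvPriority]
  split_ifs <;> simp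

-- insertBy places x after every element it is not strictly before, and before the rest
theorem pv_insertBy_split (bf : String → String → Bool) (x : String) (ys zs : List String)
    (hy : ∀ y ∈ ys, bf x y = false) (hz : ∀ z ∈ zs, bf x z = true) :
    PySem.List.insertBy bf x (ys ++ zs) = ys ++ x :: zs := by
  induction ys with
  | nil =>
    cases zs with
    | nil => simp [PySem.List.insertBy]
    | cons z zs => simp [PySem.List.insertBy, hz z (by simp)]
  | cons y ys ih =>
    simp only [List.cons_append, PySem.List.insertBy, hy y (by simp)]
    simp only [Bool.false_eq_true, if_false]
    rw [ih]
    intro y h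
    exact hy y (by simp [h])

theorem pv_sorted_parts (tw : List String) :
    PySem.List.sorted tw pvPriority false = pvF 0 tw ++ pvF 1 tw ++ pvF 2 tw := by
  rw [PySem.List.sorted_eq_foldl_insertBy]
  induction tw using List.reverseRecOn with
  | nil => simp [pvF]
  | append_singleton xs x ih =>
    rw [List.foldl_append, List.foldl_cons, List.foldl_nil, ih]
    have hmem : ∀ i (y : String), y ∈ pvF i xs → pvPriority y = i := by
      intro i y hy
      have := (List.mem_filter.mp hy).2
      simpa using this
    rcases pvPriority_cases x with h | h | h
    · rw [List.append_assoc,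
          pv_insertBy_split _ x (pvF 0 xs) (pvF 1 xs ++ pvF 2 xs)]
      · simp [pvF, h]
      · intro y hy; have := hmem 0 y hy; simp [this, h]
      · intro z hz
        rcases List.mem_append.mp hz with hz | hz
        · have := hmem 1 z hz; simp [this, h]
        · have := hmem 2 z hz; simp [this, h]
    · rw [pv_insertBy_split _ x (pvF 0 xs ++ pvF 1 xs) (pvF 2 xs)]
      · simp [pvF, h]
      · intro y hy
        rcases List.mem_append.mp hy with hy | hy
        · have := hmem 0 y hy; simp [this, h]
        · have := hmem 1 y hy; simp [this, h]
      · intro z hz; have := hmem 2 z hz; simp [this, h]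
    · rw [show pvF 0 xs ++ pvF 1 xs ++ pvF 2 xs = (pvF 0 xs ++ pvF 1 xs ++ pvF 2 xs) ++ ([] : List String) by simp,
          pv_insertBy_split _ x (pvF 0 xs ++ pvF 1 xs ++ pvF 2 xs) []]
      · simp [pvF, h]
      · intro y hy
        rcases List.mem_append.mp hy with hy | hy
        · rcases List.mem_append.mp hy with hy | hy
          · have := hmem 0 y hy; simp [this, h]
          · have := hmem 1 y hy; simp [this, h]
        · have := hmem 2 y hy; simp [this, h]
      · intro z hz; simp at hz

-- filter over a cons, resolved by the head's priority
theorem pvF_cons_eq (w : String) (rest : List String) (i : Int) (h : pvPriority w = i) :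
    pvF i (w :: rest) = w :: pvF i rest := by
  simp [pvF, h]

theorem pvF_cons_ne (w : String) (rest : List String) (i : Int) (h : pvPriority w ≠ i) :
    pvF i (w :: rest) = pvF i rest := by
  simp [pvF, h]

-- the bucketing foldl of A computes the three priority filters
theorem pv_buckets (tw : List String) (a b c : List String) :
    tw.foldl
      (fun (acc : List String × List String × List String) word =>
        let word_lower := PySem.Str.lower word
        if PySem.Set.contains pvScientificIndicators word_lower then
          (acc.1 ++ [word], acc.2.1, acc.2.2)
        else if PySem.Set.contains pvPhysicsTerms word_lower || decide ((7 : Int) ≤ PySem.Str.len word) then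
          (acc.1, acc.2.1 ++ [word], acc.2.2)
        else
          (acc.1, acc.2.1, acc.2.2 ++ [word]))
      (a, b, c) = (a ++ pvF 0 tw, b ++ pvF 1 tw, c ++ pvF 2 tw) := by
  induction tw generalizing a b c with
  | nil => simp [pvF]
  | cons w rest ih =>
    simp only [List.foldl_cons]
    by_cases h1 : PySem.Set.contains pvScientificIndicators (PySem.Str.lower w) = true
    · simp only [h1, if_true]
      rw [ih]
      have hp : pvPriority w = 0 := by dsimp only [pvPriority]; rw [if_pos h1]
      rw [pvF_cons_eq w rest 0 hp, pvF_cons_ne w rest 1 (by simp [hp]),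
          pvF_cons_ne w rest 2 (by simp [hp])]
      simp
    · by_cases h2 : (PySem.Set.contains pvPhysicsTerms (PySem.Str.lower w) || decide ((7 : Int) ≤ PySem.Str.len w)) = true
      · simp only [h1, h2, Bool.false_eq_true, if_false, if_true]
        rw [ih]
        have hp : pvPriority w = 1 := by dsimp only [pvPriority]; rw [if_neg h1, if_pos h2]
        rw [pvF_cons_eq w rest 1 hp, pvF_cons_ne w rest 0 (by simp [hp]),
            pvF_cons_ne w rest 2 (by simp [hp])]
        simp
      · simp only [h1, h2, Bool.false_eq_true, if_false]
        rw [ih]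
        have hp : pvPriority w = 2 := by dsimp only [pvPriority]; rw [if_neg h1, if_neg h2]
        rw [pvF_cons_eq w rest 2 hp, pvF_cons_ne w rest 0 (by simp [hp]),
            pvF_cons_ne w rest 1 (by simp [hp])]
        simp

theorem pv_take_append3 (H M L : List String) (k : ℕ) :
    H.take k ++ M.take (k - (H.take k).length) ++
      L.take (k - (H.take k ++ M.take (k - (H.take k).length)).length)
      = (H ++ M ++ L).take k := by
  have e1 : k - (H.take k).length = k - H.length := by
    simp only [List.length_take]; omega
  rw [e1]
  have e2 : k - (H.take k ++ M.take (k - H.length)).length = k - (H ++ M).length := by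
    simp only [List.length_take, List.length_append]; omega
  rw [e2, List.take_append, List.take_append]

-- ===== VERDICT (by name: the statement is the Claim_ definition above) =====
theorem select_enhanced_keywords_py_spec : Claim_equal_select_enhanced_keywords_py := by
  intro tw m _ hm
  have hm' : (0:Int) ≤ m := hm
  unfold Spec_select_enhanced_keywords_py select_enhanced_keywords_py select_enhanced_keywords_py_alt
  by_cases hle : (tw.length : Int) ≤ m
  · simp [hle]
  · simp only [hle, if_false]
    rw [pv_buckets tw [] [] []]
    simp only [List.nil_append]
    rw [pv_sorted_parts]
    set H := pvF 0 tw
    set M := pvF 1 tw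
    set L := pvF 2 tw
    have hmk : m = ((m.toNat : ℕ) : Int) := by omega
    set k := m.toNat with hk
    have hs1 : PySem.List.slice H none (some m) = H.take k := by
      rw [hmk, PySem.List.slice_to_natCast]
    have hr1 : (0:Int) ≤ m - ((H.take k).length : Int) := by
      have : (H.take k).length ≤ k := by simp [List.length_take]
      omega
    have hs2 : PySem.List.slice M none (some (m - ((H.take k).length : Int)))
        = M.take (k - (H.take k).length) := by
      rw [PySem.List.slice_to _ hr1]
      congr 1
      omega
    rw [hs1, hs2]
    set sel2 := H.take k ++ M.take (k - (H.take k).length) with hsel2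
    have hr2 : (0:Int) ≤ m - (sel2.length : Int) := by
      have h1 : (H.take k).length ≤ k := by simp [List.length_take]
      have h2 : (M.take (k - (H.take k).length)).length ≤ k - (H.take k).length := by
        simp [List.length_take]
      have : sel2.length ≤ k := by
        rw [hsel2, List.length_append]; omega
      omega
    have hs3 : PySem.List.slice L none (some (m - (sel2.length : Int)))
        = L.take (k - sel2.length) := by
      rw [PySem.List.slice_to _ hr2]
      congr 1
      have h1 : (H.take k).length ≤ k := by simp [List.length_take]
      have h2 : (M.take (k - (H.take k).length)).length ≤ k - (H.take k).length := by
        simp [List.length_take]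
      have : sel2.length ≤ k := by rw [hsel2, List.length_append]; omega
      omega
    rw [hs3]
    set sel3 := sel2 ++ L.take (k - sel2.length) with hsel3
    have hsel3' : sel3 = (H ++ M ++ L).take k := by
      rw [hsel3, hsel2, List.append_assoc, ← pv_take_append3 H M L k, List.append_assoc]
    have hlen : (H ++ M ++ L).length = tw.length := by
      have hperm := PySem.List.sorted_perm tw pvPriority false
      have := hperm.length_eq
      rw [pv_sorted_parts] at this
      exact this
    have hkn : k < tw.length := by omega
    have hlen3 : sel3.length = k := by
      rw [hsel3', List.length_take, hlen]
      omega
    have hguard : ¬ ((sel3.length : Int) < m) := by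
      rw [hlen3]; omega
    simp only [hguard, if_false]
    rw [hmk, PySem.List.slice_to_natCast, PySem.List.slice_to_natCast, hsel3',
        List.take_take]
    simp
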